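-- pv_equiv track=rewrite | github.com/zaheen1095/speech_emotion_robot_HRI | test.py | _clean_transcript
-- ===== SOURCE A (Python) =====
-- def _clean_transcript(s: str | None) -> str | None:
--     if not s:
--         return None
--     t = s.strip()
--     if not t:
--         return None
--
--     # Only punctuation / spaces
--     if all(ch in {'.', ',', ' ', '!', '?', '-', '…', '"', "'"} for ch in t):
--         return None
--
--     # Need some real letters
--     letters = sum(ch.isalpha() for ch in t)
--     if letters < 3:
--         return None
--
--     # Require at least 2 words (to avoid tiny hallucinations on noise)
--     if len(t.split()) < 2:
--         return None
--
--     return t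
-- ===== SOURCE B (Python) =====
-- _PUNCT = {'.', ',', ' ', '!', '?', '-', '…', '"', "'"}
--
-- def _clean_transcript(s: str | None) -> str | None:
--     # Single pass over the stripped string instead of three separate scans.
--     if not s:
--         return None
--     t = s.strip()
--     has_real = False
--     letters = 0
--     words = 0
--     prev_space = True
--     for ch in t:
--         sp = ch.isspace()
--         if ch not in _PUNCT:
--             has_real = True
--         if ch.isalpha():
--             letters += 1
--         if prev_space and not sp:
--             words += 1
--         prev_space = sp
--     if not t or not has_real or letters < 3 or words < 2:
--         return None
--     return t
-- ===== Notes on version B (the rewrite author's own statement) =====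
-- stated objective: simpler
-- what changed: Replaced A's three separate scans of the stripped string (all-in-punctuation check, letter sum, split-based word count) by one single loop that tracks a non-punctuation flag, a letter counter and a whitespace-to-word transition counter, followed by one combined test.
import Mathlib
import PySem

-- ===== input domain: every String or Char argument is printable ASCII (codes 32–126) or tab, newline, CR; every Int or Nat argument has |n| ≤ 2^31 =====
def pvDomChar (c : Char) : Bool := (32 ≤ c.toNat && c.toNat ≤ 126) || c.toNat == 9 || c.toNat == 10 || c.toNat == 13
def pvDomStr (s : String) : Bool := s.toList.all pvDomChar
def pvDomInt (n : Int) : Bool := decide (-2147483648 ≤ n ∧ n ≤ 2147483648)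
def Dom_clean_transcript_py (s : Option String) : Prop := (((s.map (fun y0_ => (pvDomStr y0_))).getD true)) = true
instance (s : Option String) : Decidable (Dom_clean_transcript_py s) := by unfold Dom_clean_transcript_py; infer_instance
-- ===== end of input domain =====

-- B merges A's three scans of the stripped string (all-in-punctuation, letter sum,
-- split-based word count) into one loop; objective: simpler (one pass, one final test).

-- the punctuation/space set shared by both Pythons
def pvPunct : List Char := ['.', ',', ' ', '!', '?', '-', '…', '"', '\'']

-- ===== PORT A =====
def clean_transcript_py (s : Option String) : Option String :=
  match s with
  | none => none
  | some s =>
    if s = "" then none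
    else
      let t := PySem.Str.strip s
      if t = "" then none
      else if t.toList.all (fun ch => pvPunct.contains ch) then none
      else
        let letters := (t.toList.map (fun ch => (PySem.Chars.isalpha ch).toNat)).sum
        if letters < 3 then none
        else if (PySem.Str.split₀ t).length < 2 then none
        else some t

-- ===== PORT B =====
-- loop state: (has_real, letters, words, prev_space)
def pvBStep (st : Bool × Nat × Nat × Bool) (ch : Char) : Bool × Nat × Nat × Bool :=
  let sp := PySem.Chars.isspace ch
  ((st.1 || !pvPunct.contains ch),
   st.2.1 + (PySem.Chars.isalpha ch).toNat,
   st.2.2.1 + (if st.2.2.2 && !sp then 1 else 0),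
   sp)

def clean_transcript_py_alt (s : Option String) : Option String :=
  match s with
  | none => none
  | some s =>
    if s = "" then none
    else
      let t := PySem.Str.strip s
      let st := t.toList.foldl pvBStep (false, 0, 0, true)
      if t = "" || !st.1 || st.2.1 < 3 || st.2.2.1 < 2 then none else some t

-- ===== PRECONDITION & SPEC =====
def Spec_clean_transcript_py (s : Option String) (out : Option String) : Prop := out = clean_transcript_py_alt s
instance (s : Option String) (out : Option String) : Decidable (Spec_clean_transcript_py s out) := by unfold Spec_clean_transcript_py; infer_instance

-- ===== CLAIM (what is proved, stated in full; the proofs are below) =====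
def Claim_equal_clean_transcript_py : Prop := ∀ (s : Option String), Dom_clean_transcript_py s → Spec_clean_transcript_py s (clean_transcript_py s)

-- ===== LEMMAS AND PROOFS =====

-- word count by space→non-space transitions, with `p` = "previous char was space (or start)"
def pvWC : List Char → Bool → Nat
  | [], _ => 0
  | c :: rest, p => (if p && !PySem.Chars.isspace c then 1 else 0) + pvWC rest (PySem.Chars.isspace c)

-- `prev_space` after the loop
def pvLast : List Char → Bool → Bool
  | [], p => p
  | c :: rest, _ => pvLast rest (PySem.Chars.isspace c)

theorem pvFoldl_spec (cs : List Char) : ∀ (b : Bool) (l w : Nat) (p : Bool),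
    cs.foldl pvBStep (b, l, w, p) =
      ((b || cs.any (fun c => !pvPunct.contains c)),
       l + cs.countP (fun c => PySem.Chars.isalpha c),
       w + pvWC cs p, pvLast cs p) := by
  induction cs with
  | nil => intro b l w p; simp [pvWC, pvLast]
  | cons c rest ih =>
    intro b l w p
    simp only [List.foldl_cons, pvBStep, ih, List.any_cons, List.countP_cons, pvWC, pvLast]
    refine Prod.ext (by simp [Bool.or_assoc]) (Prod.ext ?_ (Prod.ext ?_ rfl))
    · cases ha : PySem.Chars.isalpha c <;> simp [ha] <;> omega
    · simp only []; split_ifs <;> omega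

theorem pvGo_len (cs : List Char) : ∀ (cur : List Char) (acc : List (List Char)),
    (PySem.Chars.split₀.go cs cur acc).length =
      acc.length + (if cur.isEmpty then 0 else 1) + pvWC cs cur.isEmpty := by
  induction cs with
  | nil =>
    intro cur acc
    simp only [PySem.Chars.split₀.go, pvWC]
    split_ifs <;> simp_all
  | cons c rest ih =>
    intro cur acc
    simp only [PySem.Chars.split₀.go, pvWC]
    by_cases hsp : PySem.Chars.isspace c = true <;>
      by_cases hcur : cur.isEmpty = true <;>
      simp [hsp, hcur, ih] <;> omega

theorem pvSplit_len (cs : List Char) : (PySem.Chars.split₀ cs).length = pvWC cs true := by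
  simpa using pvGo_len cs [] []

theorem pvSum_countP (cs : List Char) :
    (cs.map (fun ch => (PySem.Chars.isalpha ch).toNat)).sum = cs.countP (fun c => PySem.Chars.isalpha c) := by
  induction cs with
  | nil => rfl
  | cons c rest ih =>
    simp only [List.map_cons, List.sum_cons, List.countP_cons, ih]
    cases h : PySem.Chars.isalpha c <;> simp [h] <;> omega

-- ===== VERDICT (by name: the statement is the Claim_ definition above) =====
theorem clean_transcript_py_spec : Claim_equal_clean_transcript_py := by
  intro s _
  unfold Spec_clean_transcript_py clean_transcript_py clean_transcript_py_alt
  match s with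
  | none => rfl
  | some s =>
    by_cases hs : s = ""
    · simp [hs]
    · simp only [hs, if_false]
      set t := PySem.Str.strip s with ht
      rw [pvFoldl_spec]
      by_cases hte : t = ""
      · simp [hte]
      · have hlen : (PySem.Str.split₀ t).length = pvWC t.toList true := by
          have h1 := congrArg List.length (PySem.Str.split₀_map_toList t)
          rw [List.length_map] at h1
          rw [h1, pvSplit_len]
        simp only [hte, if_false, Bool.false_or]
        rw [pvSum_countP, hlen]
        by_cases hall : t.toList.all (fun ch => pvPunct.contains ch) = true
        · have hany : t.toList.any (fun c => !pvPunct.contains c) = false := by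
            rw [List.any_eq_false]
            intro c hc
            simpa using List.all_eq_true.mp hall c hc
          rw [if_pos hall]
          rw [hany]
          simp
        · have hany : t.toList.any (fun c => !pvPunct.contains c) = true := by
            rw [List.any_eq_true]
            simp only [List.all_eq_true, not_forall] at hall
            obtain ⟨c, hc, hnc⟩ := hall
            exact ⟨c, hc, by simpa using hnc⟩
          rw [if_neg hall, hany]
          simp only [Bool.not_true, Bool.false_or]
          split_ifs <;> simp_all <;> omega
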